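-- pv_equiv track=rewrite | github.com/only-romano/junkyard | way/python/pylearn/pyprogs/django_tutorial/poll/srq.py | seqs
-- ===== SOURCE A (Python) =====
-- def seqs(ones, mx, seq=[]):
--     stack = [(ones, mx, seq)]
--     result = []
--     while len(stack) > 0:
--         elem = stack.pop()
--         if elem[0] > 0:
--             for i in range(1, elem[1]+1):
--                 stack.append((elem[0]-i, i, elem[2] + [i]))
--         else:
--             result.append(elem[2])
--     return result
-- ===== SOURCE B (Python) =====
-- def seqs(ones, mx, seq=[]):
--     if ones <= 0:
--         return [seq]
--     return [s for i in range(mx, 0, -1) for s in seqs(ones - i, i, seq + [i])]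
-- ===== Notes on version B (the rewrite author's own statement) =====
-- stated objective: simpler
-- what changed: Replaced A's explicit LIFO stack and while-loop with a direct recursion: base case returns [seq], otherwise a flattened comprehension over range(mx, 0, -1) recurses on (ones - i, i, seq + [i]); descending order reproduces A's stack pop order exactly.
import Mathlib
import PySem

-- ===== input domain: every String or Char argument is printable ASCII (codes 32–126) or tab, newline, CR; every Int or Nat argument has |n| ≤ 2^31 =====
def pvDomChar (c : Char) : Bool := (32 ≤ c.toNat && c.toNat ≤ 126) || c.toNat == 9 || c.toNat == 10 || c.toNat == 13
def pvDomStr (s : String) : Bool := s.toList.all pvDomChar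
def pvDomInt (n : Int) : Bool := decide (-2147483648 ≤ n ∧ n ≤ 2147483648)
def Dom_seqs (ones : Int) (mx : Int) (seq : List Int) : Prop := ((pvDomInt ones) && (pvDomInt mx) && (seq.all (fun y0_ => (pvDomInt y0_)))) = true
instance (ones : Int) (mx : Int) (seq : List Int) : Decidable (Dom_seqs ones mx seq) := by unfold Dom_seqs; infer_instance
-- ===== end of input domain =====

-- B replaces A's explicit LIFO stack loop with a direct recursive flattened comprehension
-- over range(mx, 0, -1) (objective: simpler; same values in the same order).

-- ===== PORT A =====
-- potential of one stack element, used only for the termination measure of the loop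
def pvPhi (o m : Int) : Nat := (2 * (m.toNat + 1)) ^ o.toNat

-- termination key: the children pushed for an element with o > 0 have strictly smaller total potential
theorem pvKey (o m : Int) (ho : 0 < o) :
    ((PySem.List.pyRange 1 (m + 1) 1).map (fun i => pvPhi (o - i) i)).sum < pvPhi o m := by
  have hlen : (PySem.List.pyRange 1 (m + 1) 1).length = m.toNat := by
    rw [PySem.List.length_pyRange_one]; omega
  have hbound : ∀ x ∈ (PySem.List.pyRange 1 (m + 1) 1).map (fun i => pvPhi (o - i) i),
      x ≤ (2 * (m.toNat + 1)) ^ (o.toNat - 1) := by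
    intro x hx
    rcases List.mem_map.mp hx with ⟨i, hi, rfl⟩
    rcases (PySem.List.mem_pyRange_one).mp hi with ⟨h1, h2⟩
    unfold pvPhi
    calc (2 * (i.toNat + 1)) ^ (o - i).toNat
        ≤ (2 * (m.toNat + 1)) ^ (o - i).toNat := by
          apply Nat.pow_le_pow_left; omega
      _ ≤ (2 * (m.toNat + 1)) ^ (o.toNat - 1) := by
          apply Nat.pow_le_pow_right (by omega); omega
  have hsum := List.sum_le_card_nsmul _ _ hbound
  rw [List.length_map, hlen, smul_eq_mul] at hsum
  have hpow : pvPhi o m = (2 * (m.toNat + 1)) * (2 * (m.toNat + 1)) ^ (o.toNat - 1) := by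
    unfold pvPhi
    rw [← pow_succ']
    congr 1
    omega
  calc ((PySem.List.pyRange 1 (m + 1) 1).map (fun i => pvPhi (o - i) i)).sum
      ≤ m.toNat * (2 * (m.toNat + 1)) ^ (o.toNat - 1) := hsum
    _ < (2 * (m.toNat + 1)) * (2 * (m.toNat + 1)) ^ (o.toNat - 1) := by
        have hp : 0 < (2 * (m.toNat + 1)) ^ (o.toNat - 1) := Nat.pow_pos (by omega)
        exact (Nat.mul_lt_mul_right hp).mpr (by omega)
    _ = pvPhi o m := hpow.symm

-- the while-loop of A: stack head = top of the Python list (append then pop from the end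
-- = push the reversed block of children on the front)
def seqsLoop : List (Int × Int × List Int) → List (List Int) → List (List Int)
  | [], result => result
  | (o, m, s) :: rest, result =>
    if 0 < o then
      seqsLoop (((PySem.List.pyRange 1 (m + 1) 1).map (fun i => (o - i, i, s ++ [i]))).reverse ++ rest) result
    else
      seqsLoop rest (result ++ [s])
termination_by stack _ => (stack.map (fun e => pvPhi e.1 e.2.1)).sum
decreasing_by
  · simp only [List.map_append, List.map_reverse, List.sum_append, List.sum_reverse,
      List.map_map, List.map_cons, List.sum_cons]
    have := pvKey o m (by assumption)
    have heq : ((PySem.List.pyRange 1 (m + 1) 1).map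
        ((fun e => pvPhi e.1 e.2.1) ∘ fun i => (o - i, i, s ++ [i]))).sum
        = ((PySem.List.pyRange 1 (m + 1) 1).map (fun i => pvPhi (o - i) i)).sum := by
      congr 1
    omega
  · simp only [List.map_cons, List.sum_cons]
    have : 0 < pvPhi o m := Nat.pow_pos (by omega)
    omega

def seqs (ones : Int) (mx : Int) (seq : List Int) : List (List Int) :=
  seqsLoop [(ones, mx, seq)] []

-- ===== PORT B =====
def seqs_alt (ones : Int) (mx : Int) (seq : List Int) : List (List Int) :=
  if ones ≤ 0 then [seq]
  else (PySem.List.pyRange mx 0 (-1)).attach.flatMap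
    (fun i => seqs_alt (ones - i.1) i.1 (seq ++ [i.1]))
termination_by ones.toNat
decreasing_by
  rcases (PySem.List.mem_pyRange_neg_one).mp i.2 with ⟨h1, h2⟩
  omega

-- ===== PRECONDITION & SPEC =====
def Spec_seqs (ones : Int) (mx : Int) (seq : List Int) (out : List (List Int)) : Prop := out = seqs_alt ones mx seq
instance (ones : Int) (mx : Int) (seq : List Int) (out : List (List Int)) : Decidable (Spec_seqs ones mx seq out) := by unfold Spec_seqs; infer_instance

-- ===== CLAIM (what is proved, stated in full; the proofs are below) =====
def Claim_equal_seqs : Prop := ∀ (ones : Int) (mx : Int) (seq : List Int), Dom_seqs ones mx seq → Spec_seqs ones mx seq (seqs ones mx seq)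

-- ===== LEMMAS AND PROOFS =====

theorem pvFlatMapAttach {α β : Type} (l : List α) (g : α → List β) :
    l.attach.flatMap (fun x => g x.1) = l.flatMap g := by
  rw [← List.flatMap_map, List.attach_map_subtype_val]

-- unfold B's recursion without the attach wrapper
theorem seqs_alt_eq (ones mx : Int) (seq : List Int) :
    seqs_alt ones mx seq =
      if ones ≤ 0 then [seq]
      else (PySem.List.pyRange mx 0 (-1)).flatMap
        (fun i => seqs_alt (ones - i) i (seq ++ [i])) := by
  rw [seqs_alt]
  split
  · rfl
  · exact pvFlatMapAttach _ (fun i => seqs_alt (ones - i) i (seq ++ [i]))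

-- loop invariant: the loop returns result ++ the B-values of the stack elements, in stack order
theorem seqsLoop_eq (stack : List (Int × Int × List Int)) (result : List (List Int)) :
    seqsLoop stack result = result ++ stack.flatMap (fun e => seqs_alt e.1 e.2.1 e.2.2) := by
  induction stack, result using seqsLoop.induct with
  | case1 result => simp [seqsLoop]
  | case2 o m s rest result ho ih =>
    rw [seqsLoop, if_pos ho, ih]
    have hrev : (PySem.List.pyRange 1 (m + 1) 1).reverse = PySem.List.pyRange m 0 (-1) :=
      (PySem.List.pyRange_neg_one_eq_reverse m 0).symm
    simp only [List.flatMap_cons]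
    rw [seqs_alt_eq o m s, if_neg (by omega)]
    simp only [List.flatMap_append, ← List.map_reverse, List.flatMap_map, hrev]
  | case3 o m s rest result ho ih =>
    rw [seqsLoop, if_neg ho, ih]
    simp only [List.flatMap_cons]
    rw [seqs_alt_eq o m s, if_pos (by omega)]
    simp

-- ===== VERDICT (by name: the statement is the Claim_ definition above) =====
theorem seqs_spec : Claim_equal_seqs := by
  intro ones mx seq _
  unfold Spec_seqs seqs
  rw [seqsLoop_eq]
  simp
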